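-- pv_equiv track=rewrite | github.com/asil07/daily-coding-challenge | challenges/tasks/gcd_subsequence_pairs.py | count_subsequence_pairs
-- ===== SOURCE A (Python) =====
-- from collections import defaultdict
-- from math import gcd
--
-- MOD = 10**9 + 7
--
-- def count_subsequence_pairs(nums):
--     n = len(nums)
--     # Dictionary to store the count of subsequences with each GCD value
--     gcd_count = defaultdict(int)
--
--     # Generate all non-empty subsequences and count GCD occurrences
--     for i in range(1, 1 << n):  # Loop through all possible subsequences (excluding the empty one)
--         subseq_gcd = 0  # Start with GCD as 0
--         for j in range(n):  # Iterate over each element in the array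
--             if i & (1 << j):  # Check if the j-th element is included in the current subsequence
--                 subseq_gcd = gcd(subseq_gcd, nums[j])  # Update the GCD of the current subsequence
--         gcd_count[subseq_gcd] += 1  # Increment the count for the calculated GCD
--
--     result = 0
--     # Count pairs of subsequences with the same GCD
--     for g, count in gcd_count.items():
--         # Each pair of subsequences with the same GCD contributes count * count to the result
--         result = (result + count * count) % MOD
--
--     return result
-- ===== SOURCE B (Python) =====
-- from math import gcd
--
-- MOD = 10**9 + 7
--
-- def count_subsequence_pairs(nums):
--     # Incremental GCD-DP: counts[g] = number of non-empty subsequences with gcd g.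
--     counts = {}
--     for x in nums:
--         new = dict(counts)
--         for g, c in counts.items():
--             h = gcd(g, x)
--             new[h] = new.get(h, 0) + c
--         h0 = gcd(0, x)
--         new[h0] = new.get(h0, 0) + 1
--         counts = new
--     return sum(c * c for c in counts.values()) % MOD
-- ===== Notes on version B (the rewrite author's own statement) =====
-- stated objective: faster
-- what changed: Replaces A's enumeration of all 2^n-1 bitmask subsequences (recomputing each gcd from scratch) by an incremental DP that keeps a dict mapping each reachable gcd value to its exact subsequence count, updating it per element, then sums squared counts mod 10^9+7.
import Mathlib
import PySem

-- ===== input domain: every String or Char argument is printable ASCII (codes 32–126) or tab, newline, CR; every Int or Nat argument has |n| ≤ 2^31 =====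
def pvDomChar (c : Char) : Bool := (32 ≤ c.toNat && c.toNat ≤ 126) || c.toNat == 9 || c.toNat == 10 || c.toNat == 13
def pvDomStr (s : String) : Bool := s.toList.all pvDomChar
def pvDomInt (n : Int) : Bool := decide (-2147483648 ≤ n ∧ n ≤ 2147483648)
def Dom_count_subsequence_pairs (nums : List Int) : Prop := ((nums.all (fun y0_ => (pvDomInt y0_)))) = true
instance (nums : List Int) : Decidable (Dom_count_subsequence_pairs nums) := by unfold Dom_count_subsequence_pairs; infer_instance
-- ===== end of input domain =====

-- B replaces A's exponential enumeration of all 2^n bitmasks by an incremental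
-- per-element DP on a dict of gcd counts (objective: faster, asymptotic).

-- ===== PORT A =====
-- 1 << k (Python's left shift; k ≥ 0 everywhere it is used here)
def pvBit (k : Nat) : Int := (1 : Int) <<< k

-- inner loop of A: gcd of the subsequence selected by bitmask i
-- (j ranges over range(n), so j ≥ 0 and j.toNat is exact; math.gcd = Int.gcd)
def pvSubseqGcd (nums : List Int) (i : Int) : Int :=
  (PySem.List.pyRange 0 (nums.length : Int) 1).foldl
    (fun g j =>
      if PySem.Int.band i (pvBit j.toNat) ≠ 0 then
        ((Int.gcd g (PySem.List.pyGetD nums j 0)) : Int)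
      else g) 0

def count_subsequence_pairs (nums : List Int) : Int :=
  let gcd_count : PySem.Dict Int Int :=
    (PySem.List.pyRange 1 (pvBit nums.length) 1).foldl
      (fun d i => d.modify (pvSubseqGcd nums i) 0 (· + 1)) PySem.Dict.empty
  gcd_count.items.foldl (fun r p => PySem.Int.mod (r + p.2 * p.2) 1000000007) 0

-- ===== PORT B =====
-- one DP step: new = dict(counts); for g,c in counts.items(): new[gcd(g,x)] += c; new[gcd(0,x)] += 1
def pvDpStep (d : PySem.Dict Int Int) (x : Int) : PySem.Dict Int Int :=
  let nd := d.items.foldl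
    (fun nd p => nd.insert ((Int.gcd p.1 x : Int)) (nd.getD ((Int.gcd p.1 x : Int)) 0 + p.2)) d
  nd.insert ((Int.gcd 0 x : Int)) (nd.getD ((Int.gcd 0 x : Int)) 0 + 1)

def count_subsequence_pairs_alt (nums : List Int) : Int :=
  let counts := nums.foldl pvDpStep PySem.Dict.empty
  PySem.Int.mod (counts.values.foldl (fun s c => s + c * c) 0) 1000000007

-- ===== PRECONDITION & SPEC =====
def Spec_count_subsequence_pairs (nums : List Int) (out : Int) : Prop := out = count_subsequence_pairs_alt nums
instance (nums : List Int) (out : Int) : Decidable (Spec_count_subsequence_pairs nums out) := by unfold Spec_count_subsequence_pairs; infer_instance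

-- ===== CLAIM (what is proved, stated in full; the proofs are below) =====
def Claim_equal_count_subsequence_pairs : Prop := ∀ (nums : List Int), Dom_count_subsequence_pairs nums → Spec_count_subsequence_pairs nums (count_subsequence_pairs nums)

-- ===== LEMMAS AND PROOFS =====

-- the multiset of gcds of all non-empty subsequences, in A's bitmask order
def pvGcdList (nums : List Int) : List Int :=
  (PySem.List.pyRange 1 (pvBit nums.length) 1).map (pvSubseqGcd nums)

lemma pvShift (k : Nat) : pvBit k = ((2 ^ k : Nat) : Int) := by
  simp [pvBit, Int.shiftLeft_eq]

-- A's dict is the counter of pvGcdList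
lemma pvA_eq (nums : List Int) :
    count_subsequence_pairs nums =
      (PySem.Dict.counter (pvGcdList nums)).items.foldl
        (fun r p => PySem.Int.mod (r + p.2 * p.2) 1000000007) 0 := by
  unfold count_subsequence_pairs pvGcdList
  rw [PySem.Dict.counter_eq_foldl, List.foldl_map]

lemma pvSubseqGcd_zero (ns : List Int) : pvSubseqGcd ns 0 = 0 := by
  unfold pvSubseqGcd
  rw [PySem.List.foldl_congr_mem _ _ (fun g _ => g) 0 ?_, List.foldl_fixed]
  intro acc j _
  have hb : PySem.Int.band 0 (pvBit j.toNat) = 0 := by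
    rw [PySem.Int.band_comm]; exact PySem.Int.band_zero _
  simp only [hb, ne_eq, not_true_eq_false, if_false]

lemma pvGetD_append_lt (ns : List Int) (x : Int) (j : Int) (h0 : 0 ≤ j) (h1 : j < (ns.length : Int)) :
    PySem.List.pyGetD (ns ++ [x]) j 0 = PySem.List.pyGetD ns j 0 := by
  rw [PySem.List.pyGetD_eq_getElem _ _ h0 (by simp; omega),
      PySem.List.pyGetD_eq_getElem _ _ h0 h1]
  exact List.getElem_append_left (by omega)

lemma pvSubseqGcd_low (ns : List Int) (x : Int) (m : Nat) (hm : m < 2 ^ ns.length) :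
    pvSubseqGcd (ns ++ [x]) (m : Int) = pvSubseqGcd ns (m : Int) := by
  unfold pvSubseqGcd
  have hlen : (((ns ++ [x]).length : Nat) : Int) = (ns.length : Int) + 1 := by simp
  rw [hlen, PySem.List.pyRange_one_succ_right (Int.natCast_nonneg _), List.foldl_concat]
  have hband : PySem.Int.band (m : Int) (pvBit ((ns.length : Int)).toNat) = 0 := by
    rw [pvShift, PySem.Int.band_natCast, Int.toNat_natCast]
    norm_num [Nat.and_two_pow, Nat.testBit_lt_two_pow hm]
  simp only [hband, ne_eq, not_true_eq_false, if_false]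
  apply PySem.List.foldl_congr_mem
  intro acc j hj
  obtain ⟨h0, h1⟩ := PySem.List.mem_pyRange_one.mp hj
  simp only [pvGetD_append_lt ns x j h0 h1]

lemma pvSubseqGcd_high (ns : List Int) (x : Int) (m : Nat) (hm : m < 2 ^ ns.length) :
    pvSubseqGcd (ns ++ [x]) ((2 ^ ns.length + m : Nat) : Int) =
      ((Int.gcd (pvSubseqGcd ns (m : Int)) x : Nat) : Int) := by
  unfold pvSubseqGcd
  have hlen : (((ns ++ [x]).length : Nat) : Int) = (ns.length : Int) + 1 := by simp
  rw [hlen, PySem.List.pyRange_one_succ_right (Int.natCast_nonneg _), List.foldl_concat]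
  have hband : PySem.Int.band ((2 ^ ns.length + m : Nat) : Int)
      (pvBit ((ns.length : Int)).toNat) ≠ 0 := by
    rw [pvShift, PySem.Int.band_natCast, Int.toNat_natCast, Nat.and_two_pow,
        Nat.testBit_two_pow_add_eq, Nat.testBit_lt_two_pow hm]
    simp
  have hget : PySem.List.pyGetD (ns ++ [x]) ((ns.length : Int)) 0 = x := by
    rw [PySem.List.pyGetD_eq_getElem _ _ (Int.natCast_nonneg _) (by simp)]
    exact List.getElem_concat_length (by simp) (by simp)
  have hinner : (PySem.List.pyRange 0 (ns.length : Int) 1).foldl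
      (fun g j => if PySem.Int.band ((2 ^ ns.length + m : Nat) : Int) (pvBit j.toNat) ≠ 0 then
        ((Int.gcd g (PySem.List.pyGetD (ns ++ [x]) j 0)) : Int) else g) 0
      = (PySem.List.pyRange 0 (ns.length : Int) 1).foldl
      (fun g j => if PySem.Int.band (m : Int) (pvBit j.toNat) ≠ 0 then
        ((Int.gcd g (PySem.List.pyGetD ns j 0)) : Int) else g) 0 := by
    apply PySem.List.foldl_congr_mem
    intro acc j hj
    obtain ⟨h0, h1⟩ := PySem.List.mem_pyRange_one.mp hj
    have hjn : j.toNat < ns.length := by omega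
    have hb : PySem.Int.band ((2 ^ ns.length + m : Nat) : Int) (pvBit j.toNat)
        = PySem.Int.band (m : Int) (pvBit j.toNat) := by
      rw [pvShift, PySem.Int.band_natCast, PySem.Int.band_natCast, Nat.and_two_pow,
          Nat.and_two_pow, Nat.testBit_two_pow_add_gt hjn]
    simp only [hb, pvGetD_append_lt ns x j h0 h1]
  simp only [hinner, hband, ne_eq, not_false_eq_true, if_true, hget]

lemma pvGcdList_concat (ns : List Int) (x : Int) :
    pvGcdList (ns ++ [x]) =
      pvGcdList ns ++ (0 :: pvGcdList ns).map (fun g => ((Int.gcd g x : Nat) : Int)) := by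
  unfold pvGcdList
  have hlen : (ns ++ [x]).length = ns.length + 1 := by simp
  rw [hlen, pvShift, pvShift]
  have h1 : (1 : Int) ≤ ((2 ^ ns.length : Nat) : Int) := by exact_mod_cast Nat.one_le_two_pow
  have h2 : ((2 ^ ns.length : Nat) : Int) ≤ ((2 ^ (ns.length + 1) : Nat) : Int) := by
    exact_mod_cast Nat.pow_le_pow_right (by omega) (by omega)
  rw [PySem.List.pyRange_one_append 1 ((2 ^ ns.length : Nat) : Int) _ h1 h2, List.map_append]
  congr 1
  · -- low masks: gcds are unchanged by appending x
    apply List.map_congr_left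
    intro i hi
    obtain ⟨hi1, hi2⟩ := PySem.List.mem_pyRange_one.mp hi
    have h0 : 0 ≤ i := by omega
    have : i = ((i.toNat : Nat) : Int) := by omega
    rw [this]
    exact pvSubseqGcd_low ns x i.toNat (by omega)
  · -- high masks: bit n set, one extra gcd step with x
    have hzero : (0 : Int) :: (PySem.List.pyRange 1 ((2 ^ ns.length : Nat) : Int) 1).map (pvSubseqGcd ns)
        = (PySem.List.pyRange 0 ((2 ^ ns.length : Nat) : Int) 1).map (pvSubseqGcd ns) := by
      have hpos : (0 : Int) < ((2 ^ ns.length : Nat) : Int) := by exact_mod_cast Nat.two_pow_pos ns.length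
      rw [PySem.List.pyRange_one_cons hpos, List.map_cons, pvSubseqGcd_zero]
      norm_num
    rw [hzero, List.map_map]
    rw [PySem.List.pyRange_one ((2 ^ ns.length : Nat) : Int), PySem.List.pyRange_one 0]
    have hd1 : (((2 ^ (ns.length + 1) : Nat) : Int) - ((2 ^ ns.length : Nat) : Int)).toNat = 2 ^ ns.length := by
      have : (2:Nat) ^ (ns.length + 1) = 2 ^ ns.length + 2 ^ ns.length := by ring
      omega
    have hd2 : (((2 ^ ns.length : Nat) : Int) - 0).toNat = 2 ^ ns.length := by omega
    rw [hd1, hd2, List.map_map, List.map_map]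
    apply List.map_congr_left
    intro k hk
    have hk' : k < 2 ^ ns.length := List.mem_range.mp hk
    simp only [Function.comp_apply]
    have hcast : ((2 ^ ns.length : Nat) : Int) + (k : Int) = ((2 ^ ns.length + k : Nat) : Int) := by push_cast; ring
    rw [hcast, pvSubseqGcd_high ns x k hk', zero_add]

-- value sum of the inner insert loop of pvDpStep
lemma pvFoldlInsGetD (x h : Int) : ∀ (ps : List (Int × Int)) (d0 : PySem.Dict Int Int),
    (ps.foldl (fun nd p =>
        nd.insert ((Int.gcd p.1 x : Nat) : Int) (nd.getD ((Int.gcd p.1 x : Nat) : Int) 0 + p.2)) d0).getD h 0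
      = d0.getD h 0 + ((ps.filter (fun p => ((Int.gcd p.1 x : Nat) : Int) == h)).map (·.2)).sum := by
  intro ps
  induction ps with
  | nil => intro d0; simp
  | cons p ps ih =>
    intro d0
    rw [List.foldl_cons, ih, List.filter_cons, PySem.Dict.getD_insert]
    by_cases hc : ((Int.gcd p.1 x : Nat) : Int) = h
    · simp only [hc, beq_self_eq_true, if_true, List.map_cons, List.sum_cons]
      ring
    · have hcb : (((Int.gcd p.1 x : Nat) : Int) == h) = false := by simp [hc]
      simp only [hcb, Bool.false_eq_true, if_false, if_neg (fun hh => hc (Eq.symm hh))]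

-- summing per-key counts over a nodup key cover computes countP
lemma pvSumCounts (p : Int → Bool) : ∀ (S : List Int), S.Nodup → ∀ (L : List Int), (∀ k ∈ L, k ∈ S) →
    ((S.filter p).map (fun k => ((L.count k : Nat) : Int))).sum = ((L.countP p : Nat) : Int) := by
  intro S
  induction S with
  | nil =>
    intro _ L hsub
    have : L = [] := List.eq_nil_iff_forall_not_mem.mpr (fun a ha => by simpa using hsub a ha)
    subst this; simp
  | cons k S ih =>
    intro hnd L hsub
    have hk : k ∉ S := (List.nodup_cons.mp hnd).1
    have hnd' : S.Nodup := (List.nodup_cons.mp hnd).2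
    have hsub' : ∀ k' ∈ L.filter (fun a => !(a == k)), k' ∈ S := by
      intro k' hk'
      obtain ⟨hmem, hne⟩ := List.mem_filter.mp hk'
      rcases List.mem_cons.mp (hsub k' hmem) with h | h
      · simp [h] at hne
      · exact h
    have hrec := ih hnd' (L.filter (fun a => !(a == k))) hsub'
    have hcongr : ∀ k' ∈ S.filter p,
        ((L.count k' : Nat) : Int) = (((L.filter (fun a => !(a == k))).count k' : Nat) : Int) := by
      intro k' hk'
      have hne : k' ≠ k := fun h => hk (h ▸ (List.mem_filter.mp hk').1)
      rw [List.count_filter (by simp [hne])]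
    have hsplit : L.countP p = (L.filter (fun a => a == k)).countP p
        + (L.filter (fun a => !(a == k))).countP p :=
      List.countP_eq_countP_filter_add L p (fun a => a == k)
    have hrepl : (L.filter (fun a => a == k)).countP p = if p k then L.count k else 0 := by
      rw [List.filter_beq, List.countP_replicate]
    rw [List.filter_cons]
    by_cases hp : p k
    · simp only [hp, if_true, List.map_cons, List.sum_cons]
      rw [List.map_congr_left hcongr, hrec, hsplit, hrepl, if_pos hp]
      push_cast; ring
    · simp only [hp, Bool.false_eq_true, if_false]
      rw [List.map_congr_left hcongr, hrec, hsplit, hrepl, if_neg hp]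
      push_cast; ring

lemma pvDpStep_inv (d : PySem.Dict Int Int) (L : List Int) (x : Int)
    (hnd : d.keys.Nodup) (hmem : ∀ k, k ∈ d.keys ↔ k ∈ L)
    (hcnt : ∀ k, d.getD k 0 = ((L.count k : Nat) : Int)) :
    (pvDpStep d x).keys.Nodup ∧
    (∀ k, k ∈ (pvDpStep d x).keys ↔ k ∈ L ++ (0 :: L).map (fun g => ((Int.gcd g x : Nat) : Int))) ∧
    (∀ k, (pvDpStep d x).getD k 0 =
      (((L ++ (0 :: L).map (fun g => ((Int.gcd g x : Nat) : Int))).count k : Nat) : Int)) := by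
  have hitems : d.items = d.keys.map (fun k => (k, d.getD k 0)) := PySem.Dict.items_eq_map_keys d hnd 0
  set nd := d.items.foldl
      (fun nd p => nd.insert ((Int.gcd p.1 x : Int)) (nd.getD ((Int.gcd p.1 x : Int)) 0 + p.2)) d with hnddef
  have hstep : pvDpStep d x = nd.insert ((Int.gcd 0 x : Int)) (nd.getD ((Int.gcd 0 x : Int)) 0 + 1) := rfl
  have hkeys : nd.keys = PySem.Set.update d.keys (d.items.map (fun p => ((Int.gcd p.1 x : Int)))) :=
    PySem.Dict.keys_foldl_insert_key _ _ _ _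
  have hndp : nd.keys.Nodup := PySem.Dict.nodup_keys_foldl_insert_key _ _ _ _ hnd
  have hmapkey : d.items.map (fun p : Int × Int => ((Int.gcd p.1 x : Int)))
      = d.keys.map (fun g => ((Int.gcd g x : Int))) := by
    rw [hitems, List.map_map]; rfl
  have hgetd : ∀ h, nd.getD h 0 = ((L.count h : Nat) : Int)
      + ((L.countP (fun g => ((Int.gcd g x : Int)) == h) : Nat) : Int) := by
    intro h
    rw [hnddef, pvFoldlInsGetD x h d.items d, hcnt h]
    congr 1
    rw [hitems, List.filter_map, List.map_map]
    simp only [Function.comp_def]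
    rw [List.map_congr_left (fun k _ => hcnt k)]
    exact pvSumCounts (fun g => ((Int.gcd g x : Int)) == h) d.keys hnd L (fun k hk => (hmem k).mpr hk)
  have hmapcnt : ∀ kk : Int, ((L.map (fun g => ((Int.gcd g x : Int)))).count kk : Nat)
      = L.countP (fun g => ((Int.gcd g x : Int)) == kk) := by
    intro kk; rw [List.count_eq_countP, List.countP_map]; rfl
  refine ⟨?_, ?_, ?_⟩
  · rw [hstep]; exact PySem.Dict.nodup_keys_insert _ _ _ hndp
  · intro k
    rw [hstep, PySem.Dict.mem_keys_insert, hkeys, PySem.Set.mem_update, hmapkey]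
    simp only [List.mem_append, List.map_cons, List.mem_cons, List.mem_map, hmem]
    tauto
  · intro k
    rw [hstep, PySem.Dict.getD_insert]
    have hrhs : (((L ++ (0 :: L).map (fun g => ((Int.gcd g x : Nat) : Int))).count k : Nat) : Int)
        = ((L.count k : Nat) : Int)
          + ((L.countP (fun g => ((Int.gcd g x : Int)) == k) : Nat) : Int)
          + (if k = ((Int.gcd 0 x : Int)) then 1 else 0) := by
      rw [List.count_append, List.map_cons, List.count_cons, hmapcnt k]
      by_cases hk0 : k = ((Int.gcd 0 x : Int))
      · simp only [hk0, beq_self_eq_true, if_true]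
        push_cast; ring
      · have hb : (((Int.gcd 0 x : Int)) == k) = false := beq_eq_false_iff_ne.mpr (Ne.symm hk0)
        rw [if_neg hk0, hb]
        simp only [Bool.false_eq_true, if_false]
        push_cast; ring
    rw [hrhs]
    by_cases hkg : k = ((Int.gcd 0 x : Int))
    · rw [if_pos hkg, if_pos hkg, hgetd, hkg]
    · rw [if_neg hkg, if_neg hkg, hgetd, add_zero]

lemma pvDpInv (nums : List Int) :
    (nums.foldl pvDpStep PySem.Dict.empty).keys.Nodup ∧
    (∀ k, k ∈ (nums.foldl pvDpStep PySem.Dict.empty).keys ↔ k ∈ pvGcdList nums) ∧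
    (∀ k, (nums.foldl pvDpStep PySem.Dict.empty).getD k 0 = (((pvGcdList nums).count k : Nat) : Int)) := by
  induction nums using List.reverseRecOn with
  | nil =>
    have h0 : pvGcdList ([] : List Int) = [] := rfl
    refine ⟨?_, ?_, ?_⟩
    · simp [PySem.Dict.keys_empty]
    · intro k; simp [h0, PySem.Dict.keys_empty]
    · intro k; simp [h0, PySem.Dict.getD_empty]
  | append_singleton ns x ih =>
    obtain ⟨hnd, hmem, hcnt⟩ := ih
    rw [List.foldl_concat, pvGcdList_concat]
    exact pvDpStep_inv _ _ x hnd hmem hcnt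

lemma pvModFold (g : Int → Int) : ∀ (l : List Int) (s : Int),
    l.foldl (fun r k => PySem.Int.mod (r + g k) 1000000007) (PySem.Int.mod s 1000000007)
      = PySem.Int.mod (s + (l.map g).sum) 1000000007 := by
  intro l
  induction l with
  | nil => intro s; simp
  | cons a l ih =>
    intro s
    rw [List.foldl_cons]
    have hmm : PySem.Int.mod (PySem.Int.mod s 1000000007 + g a) 1000000007
        = PySem.Int.mod (s + g a) 1000000007 := by
      rw [PySem.Int.mod_eq_emod_of_pos (by norm_num), PySem.Int.mod_eq_emod_of_pos (by norm_num),
          PySem.Int.mod_eq_emod_of_pos (by norm_num)]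
      omega
    rw [hmm, ih (s + g a)]
    congr 1
    rw [List.map_cons, List.sum_cons]
    ring

-- ===== VERDICT (by name: the statement is the Claim_ definition above) =====
theorem count_subsequence_pairs_spec : Claim_equal_count_subsequence_pairs := by
  intro nums _
  unfold Spec_count_subsequence_pairs
  obtain ⟨hnd, hmem, hcnt⟩ := pvDpInv nums
  -- A's result: mod-sum of squared counts over the distinct gcds, in counter key order
  rw [pvA_eq, PySem.Dict.items_counter, List.foldl_map]
  have hA := pvModFold (fun k => (((pvGcdList nums).count k : Nat) : Int) * (((pvGcdList nums).count k : Nat) : Int))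
      (PySem.Set.ofList (pvGcdList nums)) 0
  have hz : PySem.Int.mod 0 1000000007 = 0 := by decide
  rw [hz] at hA
  rw [hA, zero_add]
  -- B's result: the same sum over B's key order
  have hBdef : count_subsequence_pairs_alt nums
      = PySem.Int.mod ((nums.foldl pvDpStep PySem.Dict.empty).values.foldl
          (fun s c => s + c * c) 0) 1000000007 := rfl
  rw [hBdef, PySem.Dict.values_eq_map_keys _ hnd 0,
      List.map_congr_left (fun k _ => hcnt k),
      PySem.List.foldl_add _ (fun c => c * c) 0, zero_add, List.map_map]
  -- the two key lists are permutations of each other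
  have hperm : (PySem.Set.ofList (pvGcdList nums) : List Int).Perm
      ((nums.foldl pvDpStep PySem.Dict.empty).keys) := by
    rw [List.perm_ext_iff_of_nodup (PySem.Set.nodup_ofList _) hnd]
    intro a
    rw [PySem.Set.mem_ofList, hmem]
  have hsum := (hperm.map (fun k => (((pvGcdList nums).count k : Nat) : Int) * (((pvGcdList nums).count k : Nat) : Int))).sum_eq
  rw [hsum]
  rfl
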